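-- pv_equiv track=rewrite | github.com/zencd/android-debloater | src/user_prefs.py | _convert_multi_line_description_to_one_line
-- ===== SOURCE A (Python) =====
-- def _convert_multi_line_description_to_one_line(s: str):
--     lines = s.splitlines()
--     lines = map(str.strip, lines)
--     lines = filter(bool, lines)
--     res = ''
--     for line in lines:
--         if res:
--             res += ' ' if res[-1] == '.' else ' - '
--         res += line
--     return res
-- ===== SOURCE B (Python) =====
-- def _convert_multi_line_description_to_one_line(s: str):
--     def rec(lines):
--         if not lines:
--             return ''
--         head, tail = lines[0], lines[1:]
--         if not tail:
--             return head
--         sep = ' ' if head.endswith('.') else ' - '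
--         return head + sep + rec(tail)
--     return rec([t for t in map(str.strip, s.splitlines()) if t])
-- ===== Notes on version B (the rewrite author's own statement) =====
-- stated objective: alternative
-- what changed: Replaces A's iterative left-fold string accumulator (which inspects res[-1] of the growing result to pick the separator) with a structural recursion over the materialized cleaned-line list that builds the string back-to-front, each call gluing its head to the recursively joined tail.
import Mathlib
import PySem

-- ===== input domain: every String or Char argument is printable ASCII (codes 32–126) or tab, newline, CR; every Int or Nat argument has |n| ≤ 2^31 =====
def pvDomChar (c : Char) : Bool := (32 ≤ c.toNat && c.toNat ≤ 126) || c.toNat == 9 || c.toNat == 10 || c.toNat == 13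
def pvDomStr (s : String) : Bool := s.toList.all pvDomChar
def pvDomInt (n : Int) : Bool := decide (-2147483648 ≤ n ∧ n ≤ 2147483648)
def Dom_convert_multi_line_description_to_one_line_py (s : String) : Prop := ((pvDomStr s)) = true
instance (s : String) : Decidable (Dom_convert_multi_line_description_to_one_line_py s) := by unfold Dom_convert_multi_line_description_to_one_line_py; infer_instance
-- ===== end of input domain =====

-- B replaces A's iterative accumulator loop (separator chosen by peeking at res[-1])
-- with a structural recursion over the cleaned-line list building the result
-- back-to-front; objective: alternative decomposition, same cost.

-- ===== PORT A =====
def convert_multi_line_description_to_one_line_py (s : String) : String :=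
  let lines := (PySem.Str.splitlines s).map PySem.Str.strip
  let lines := lines.filter (fun l => l != "")
  lines.foldl (fun res line =>
    (if res != "" then
       res ++ (if PySem.Str.pyGet? res (-1) == some '.' then " " else " - ")
     else res) ++ line) ""

-- ===== PORT B =====
-- recursive helper: rec(lines) in Source B
def pvRecJoin : List String → String
  | [] => ""
  | [h] => h
  | h :: c :: rest =>
    h ++ (if PySem.Str.endswith h "." then " " else " - ") ++ pvRecJoin (c :: rest)

def convert_multi_line_description_to_one_line_py_alt (s : String) : String :=
  pvRecJoin (((PySem.Str.splitlines s).map PySem.Str.strip).filter (fun l => l != ""))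

-- ===== PRECONDITION & SPEC =====
def Spec_convert_multi_line_description_to_one_line_py (s : String) (out : String) : Prop := out = convert_multi_line_description_to_one_line_py_alt s
instance (s : String) (out : String) : Decidable (Spec_convert_multi_line_description_to_one_line_py s out) := by unfold Spec_convert_multi_line_description_to_one_line_py; infer_instance

-- ===== CLAIM (what is proved, stated in full; the proofs are below) =====
def Claim_equal_convert_multi_line_description_to_one_line_py : Prop := ∀ (s : String), Dom_convert_multi_line_description_to_one_line_py s → Spec_convert_multi_line_description_to_one_line_py s (convert_multi_line_description_to_one_line_py s)

-- ===== LEMMAS AND PROOFS =====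

-- "glue of the tail": separators chosen by the PREVIOUS line's last char
def pvGlue : String → List String → String
  | _, [] => ""
  | p, c :: rest => ((if PySem.Str.endswith p "." then " " else " - ") ++ c) ++ pvGlue c rest

theorem pvEndswithDot (p : List Char) :
    PySem.Chars.endswith p ['.'] = (p.getLast? == some '.') := by
  rcases eq_or_ne p [] with rfl | h
  · decide
  · rw [Bool.eq_iff_iff, PySem.Chars.endswith_iff, beq_iff_eq]
    constructor
    · rintro ⟨pre, rfl⟩; simp
    · intro hl
      rw [List.getLast?_eq_some_getLast h, Option.some_inj] at hl
      refine ⟨p.dropLast, ?_⟩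
      conv_rhs => rw [← List.dropLast_concat_getLast h]
      rw [hl]

theorem pvNeNilToList (x : String) (h : x ≠ "") : x.toList ≠ [] := by
  intro hc; apply h; apply String.ext; simpa using hc

theorem pvFoldA (t : List String) : ∀ (acc p : String), acc ≠ "" →
    acc.toList.getLast? = p.toList.getLast? → (∀ x ∈ t, x ≠ "") →
    t.foldl (fun res line =>
      (if res != "" then
         res ++ (if PySem.Str.pyGet? res (-1) == some '.' then " " else " - ")
       else res) ++ line) acc = acc ++ pvGlue p t := by
  induction t with
  | nil => intro acc p _ _ _; simp [pvGlue]
  | cons c rest ih =>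
    intro acc p hacc hlast ht
    have hc : c ≠ "" := ht c (by simp)
    have hcl := pvNeNilToList c hc
    have hcond : (PySem.Str.pyGet? acc (-1) == some '.') = PySem.Str.endswith p "." := by
      simp only [PySem.Str.pyGet?_eq, PySem.Str.endswith_eq]
      have : PySem.Chars.pyGet? acc.toList (-1) = acc.toList.getLast? := by
        simp [PySem.List.pyGet?_neg_one]
      rw [this, hlast]
      have : ("." : String).toList = ['.'] := rfl
      rw [this, pvEndswithDot]
    have hstep : (if acc != "" then
         acc ++ (if PySem.Str.pyGet? acc (-1) == some '.' then " " else " - ")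
       else acc) ++ c = (acc ++ (if PySem.Str.endswith p "." then " " else " - ")) ++ c := by
      rw [if_pos (by simpa using hacc), hcond]
    rw [List.foldl_cons, hstep,
        ih _ c (by
            intro hz
            have h2 := congrArg String.toList hz
            simp at h2
            exact hc h2.2.2)
          (by rw [String.toList_append, List.getLast?_append_of_ne_nil _ hcl])
          (fun x hx => ht x (by simp [hx]))]
    simp [pvGlue, String.append_assoc]

theorem pvRecJoin_eq_glue (t : List String) : ∀ (h : String),
    pvRecJoin (h :: t) = h ++ pvGlue h t := by
  induction t with
  | nil => intro h; simp [pvRecJoin, pvGlue]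
  | cons c rest ih =>
    intro h
    rw [show pvRecJoin (h :: c :: rest)
        = h ++ (if PySem.Str.endswith h "." then " " else " - ") ++ pvRecJoin (c :: rest)
        from rfl, ih c]
    simp [pvGlue, String.append_assoc]

-- ===== VERDICT (by name: the statement is the Claim_ definition above) =====
theorem convert_multi_line_description_to_one_line_py_spec : Claim_equal_convert_multi_line_description_to_one_line_py := by
  intro s _
  unfold Spec_convert_multi_line_description_to_one_line_py
    convert_multi_line_description_to_one_line_py
    convert_multi_line_description_to_one_line_py_alt
  show List.foldl (fun res line =>
      (if res != "" then
         res ++ (if PySem.Str.pyGet? res (-1) == some '.' then " " else " - ")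
       else res) ++ line) ""
      (((PySem.Str.splitlines s).map PySem.Str.strip).filter (fun l => l != "")) =
    pvRecJoin (((PySem.Str.splitlines s).map PySem.Str.strip).filter (fun l => l != ""))
  generalize hL : ((PySem.Str.splitlines s).map PySem.Str.strip).filter (fun l => l != "") = L
  have hmem : ∀ x ∈ L, x ≠ "" := by
    intro x hx
    rw [← hL] at hx
    simpa using (List.mem_filter.mp hx).2
  cases L with
  | nil => rfl
  | cons h t =>
    have hh : h ≠ "" := hmem h (by simp)
    have hstep0 : (if ("" : String) != "" then
         "" ++ (if PySem.Str.pyGet? "" (-1) == some '.' then " " else " - ")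
       else "") ++ h = h := by simp
    rw [List.foldl_cons, hstep0,
        pvFoldA t h h hh rfl (fun x hx => hmem x (by simp [hx])),
        pvRecJoin_eq_glue t h]
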